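-- pv_equiv track=rewrite | github.com/nitishgupta/allennlp-semparse | scripts/nlvr_v2/paired_supervision/generate_paired_data.py | convert_abstract_phrase_to_grounded
-- ===== SOURCE A (Python) =====
-- from typing import List, Dict
-- import copy
--
-- COLORS = ["yellow", "black", "blue"]
--
-- SHAPES = ["circle", "triangle", "square"]
--
-- NUMBERS = [
--     "one",
--     "two",
--     "three",
--     "four",
--     "five",
--     "six",
--     "seven",
--     "eight",
--     "nine",
-- ]
--
-- number_strings = {
--     "one": "1",
--     "two": "2",
--     "three": "3",
--     "four": "4",
--     "five": "5",
--     "six": "6",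
--     "seven": "7",
--     "eight": "8",
--     "nine": "9",
--     "ten": "10",
-- }
--
-- def convert_abstract_phrase_to_grounded(abstract_phrases: List[str]) -> List[List[str]]:
--     """Convert a set of abstract phrases into multiple grounded sets each set containing a unique combination of
--     abstract token to grounded token mapping.
--     For example, input: ["COLOR1 at the base", "COLOR1 as the base"] would be converted to multiple sets, each one
--     containing one value for the COLOR1 variable
--
--     We currently limit to two colors, two shapes and one number in the phrase.
--     """
--
--     # This contains different equivalent (partially) grounded phrases.
--     grounded_phrases_sets: List[List[str]] = [abstract_phrases]
--
--     abstractions = ["COLOR1", "COLOR2", "SHAPE1", "SHAPE2", "NUMBER1"]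
--     for abstract_token in abstractions:
--         # Go through each possible abstract token in order and expand `grounded_phrases` by considering all possible
--         # groundings of this abstract token
--         new_grounded_phrases_sets = []
--         for equivalent_set in grounded_phrases_sets:
--             # Mutate this set into multiple equivalent sets by replacing the abstract token with all its groundings.
--             # For example, if this set is
--             # ["yellow SHAPE1 at the base"], it should lead to three new sets ["yellow square at the base"],
--             # ["yellow triangle at the base"], and ["yellow circle at the base"].
--             if not all([abstract_token in x for x in equivalent_set]):
--                 # If phrases in this set does not contain the abstract token, mutations cannot be made
--                 # add this equivalent set to the final sets as it is
--                 new_grounded_phrases_sets.append(equivalent_set)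
--                 continue
--             if "COLOR" in abstract_token:
--                 options = COLORS
--             elif "SHAPE" in abstract_token:
--                 options = SHAPES
--             elif "NUMBER" in abstract_token:
--                 options = NUMBERS
--             else:
--                 raise NotImplementedError
--             # This equivalent set would be mutated into as many new sets as grounding options
--             new_equivalent_sets = []
--             for grounding_token in options:
--                 # Each phrase in the current equivalent set will be grounded with this token and added to the new set
--                 new_equivalent_set = []
--                 for phrase in equivalent_set:
--                     new_phrase = phrase.replace(abstract_token, grounding_token)
--                     new_equivalent_set.append(new_phrase)
--                 if grounding_token in number_strings:
--                     alternate_token = number_strings[grounding_token]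
--                     for phrase in equivalent_set:
--                         new_phrase = phrase.replace(abstract_token, alternate_token)
--                         new_equivalent_set.append(new_phrase)
--                 if new_equivalent_set:
--                     new_equivalent_sets.append(new_equivalent_set)
--             # Add these new sets to the new collection
--             new_grounded_phrases_sets.extend(new_equivalent_sets)
--         grounded_phrases_sets = copy.deepcopy(new_grounded_phrases_sets)
--
--     return grounded_phrases_sets
-- ===== SOURCE B (Python) =====
-- from typing import List
--
-- COLORS = ["yellow", "black", "blue"]
-- SHAPES = ["circle", "triangle", "square"]
-- NUMBERS = ["one", "two", "three", "four", "five", "six", "seven", "eight", "nine"]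
-- number_strings = {
--     "one": "1", "two": "2", "three": "3", "four": "4", "five": "5",
--     "six": "6", "seven": "7", "eight": "8", "nine": "9", "ten": "10",
-- }
--
--
-- def _groundings(token: str, phrases: List[str]) -> List[List[str]]:
--     """All groundings of `token` applied to `phrases` (non-empty results only)."""
--     if "COLOR" in token:
--         options = COLORS
--     elif "SHAPE" in token:
--         options = SHAPES
--     else:
--         options = NUMBERS
--     sets = []
--     for o in options:
--         s = [p.replace(token, o) for p in phrases]
--         if o in number_strings:
--             s += [p.replace(token, number_strings[o]) for p in phrases]
--         if s:
--             sets.append(s)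
--     return sets
--
--
-- def _expand(tokens: List[str], phrases: List[str]) -> List[List[str]]:
--     """Depth-first expansion: ground the first applicable token, recurse on the rest."""
--     if not tokens:
--         return [phrases]
--     token, rest = tokens[0], tokens[1:]
--     if not all(token in p for p in phrases):
--         return _expand(rest, phrases)
--     return [g for s in _groundings(token, phrases) for g in _expand(rest, s)]
--
--
-- def convert_abstract_phrase_to_grounded(abstract_phrases: List[str]) -> List[List[str]]:
--     return _expand(["COLOR1", "COLOR2", "SHAPE1", "SHAPE2", "NUMBER1"], abstract_phrases)
-- ===== Notes on version B (the rewrite author's own statement) =====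
-- stated objective: simpler
-- what changed: A's breadth-first staged loop (one pass per abstract token over the whole current collection of sets, rebuilt with append-accumulators and a deepcopy per stage) is replaced by a depth-first recursion over the token list that fully grounds one phrase set at a time, with the per-token groundings factored into one small helper.
import Mathlib
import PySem

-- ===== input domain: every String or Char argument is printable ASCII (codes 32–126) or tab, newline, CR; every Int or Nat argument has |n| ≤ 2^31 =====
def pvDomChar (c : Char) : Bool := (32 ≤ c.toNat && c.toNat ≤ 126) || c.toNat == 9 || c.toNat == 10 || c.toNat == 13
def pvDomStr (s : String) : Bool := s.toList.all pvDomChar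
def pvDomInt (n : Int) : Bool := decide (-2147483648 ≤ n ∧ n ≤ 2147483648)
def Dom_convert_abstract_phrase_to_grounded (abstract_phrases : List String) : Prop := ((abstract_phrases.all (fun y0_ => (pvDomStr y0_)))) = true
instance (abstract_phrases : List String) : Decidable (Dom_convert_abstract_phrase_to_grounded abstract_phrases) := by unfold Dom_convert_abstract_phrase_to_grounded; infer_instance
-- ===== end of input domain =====

-- B replaces A's breadth-first staged loop (one pass over all current sets per abstract token, with
-- append-accumulators and a deepcopy per stage) by a depth-first recursion over the token list that
-- fully grounds one set at a time; objective: simpler.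

def pvCOLORS : List String := ["yellow", "black", "blue"]
def pvSHAPES : List String := ["circle", "triangle", "square"]
def pvNUMBERS : List String :=
  ["one", "two", "three", "four", "five", "six", "seven", "eight", "nine"]
def pvNumberStrings : PySem.Dict String String := PySem.Dict.ofList
  [("one", "1"), ("two", "2"), ("three", "3"), ("four", "4"), ("five", "5"),
   ("six", "6"), ("seven", "7"), ("eight", "8"), ("nine", "9"), ("ten", "10")]

-- ===== PORT A =====
-- literal port of A's staged loop; copy.deepcopy of a list of lists of strings is the identity on
-- values, so the final `grounded_phrases_sets = copy.deepcopy(...)` is ported as plain rebinding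
def convert_abstract_phrase_to_grounded (abstract_phrases : List String) : List (List String) :=
  let abstractions : List String := ["COLOR1", "COLOR2", "SHAPE1", "SHAPE2", "NUMBER1"]
  abstractions.foldl (fun grounded_phrases_sets abstract_token =>
    grounded_phrases_sets.foldl (fun new_grounded_phrases_sets equivalent_set =>
      if !(equivalent_set.all (fun x => PySem.Str.isIn abstract_token x)) then
        new_grounded_phrases_sets ++ [equivalent_set]
      else
        let options : List String :=
          if PySem.Str.isIn "COLOR" abstract_token then pvCOLORS
          else if PySem.Str.isIn "SHAPE" abstract_token then pvSHAPES
          else if PySem.Str.isIn "NUMBER" abstract_token then pvNUMBERS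
          else []  -- Python raises NotImplementedError here; unreachable: `abstractions` is a fixed literal list
        let new_equivalent_sets := options.foldl (fun new_equivalent_sets grounding_token =>
          let new_equivalent_set := equivalent_set.foldl
            (fun acc phrase => acc ++ [PySem.Str.replace phrase abstract_token grounding_token]) []
          let new_equivalent_set :=
            if pvNumberStrings.contains grounding_token then
              let alternate_token := pvNumberStrings.getD grounding_token ""
              equivalent_set.foldl
                (fun acc phrase => acc ++ [PySem.Str.replace phrase abstract_token alternate_token])
                new_equivalent_set
            else new_equivalent_set
          if new_equivalent_set ≠ [] then new_equivalent_sets ++ [new_equivalent_set]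
          else new_equivalent_sets) []
        new_grounded_phrases_sets ++ new_equivalent_sets) []
  ) [abstract_phrases]

-- ===== PORT B =====
def pvGroundings (token : String) (phrases : List String) : List (List String) :=
  let options : List String :=
    if PySem.Str.isIn "COLOR" token then pvCOLORS
    else if PySem.Str.isIn "SHAPE" token then pvSHAPES
    else pvNUMBERS
  options.filterMap (fun o =>
    let s := phrases.map (fun p => PySem.Str.replace p token o)
    let s :=
      if pvNumberStrings.contains o then
        s ++ phrases.map (fun p => PySem.Str.replace p token (pvNumberStrings.getD o ""))
      else s
    if s = [] then none else some s)

def pvExpand : List String → List String → List (List String)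
  | [], phrases => [phrases]
  | token :: rest, phrases =>
    if !(phrases.all (fun p => PySem.Str.isIn token p)) then pvExpand rest phrases
    else (pvGroundings token phrases).flatMap (fun s => pvExpand rest s)

def convert_abstract_phrase_to_grounded_alt (abstract_phrases : List String) : List (List String) :=
  pvExpand ["COLOR1", "COLOR2", "SHAPE1", "SHAPE2", "NUMBER1"] abstract_phrases

-- ===== PRECONDITION & SPEC =====
def Spec_convert_abstract_phrase_to_grounded (abstract_phrases : List String) (out : List (List String)) : Prop := out = convert_abstract_phrase_to_grounded_alt abstract_phrases
instance (abstract_phrases : List String) (out : List (List String)) : Decidable (Spec_convert_abstract_phrase_to_grounded abstract_phrases out) := by unfold Spec_convert_abstract_phrase_to_grounded; infer_instance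

-- ===== CLAIM (what is proved, stated in full; the proofs are below) =====
def Claim_equal_convert_abstract_phrase_to_grounded : Prop := ∀ (abstract_phrases : List String), Dom_convert_abstract_phrase_to_grounded abstract_phrases → Spec_convert_abstract_phrase_to_grounded abstract_phrases (convert_abstract_phrase_to_grounded abstract_phrases)

-- ===== LEMMAS AND PROOFS =====

-- the per-set, per-token step A performs, written with B's vocabulary
def pvF (t : String) (s : List String) : List (List String) :=
  if !(s.all (fun p => PySem.Str.isIn t p)) then [s] else pvGroundings t s

-- A's inner new_equivalent_set (let-chain written out; definitionally the port's body)
def pvNE (t g : String) (s : List String) : List String :=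
  if pvNumberStrings.contains g then
    s.foldl (fun acc p => acc ++ [PySem.Str.replace p t (pvNumberStrings.getD g "")])
      (s.foldl (fun acc p => acc ++ [PySem.Str.replace p t g]) [])
  else s.foldl (fun acc p => acc ++ [PySem.Str.replace p t g]) []

-- B's grounded set for one option (definitionally pvGroundings' body)
def pvM (t o : String) (s : List String) : List String :=
  if pvNumberStrings.contains o then
    s.map (fun p => PySem.Str.replace p t o)
      ++ s.map (fun p => PySem.Str.replace p t (pvNumberStrings.getD o ""))
  else s.map (fun p => PySem.Str.replace p t o)

theorem pvNE_eq (t g : String) (s : List String) : pvNE t g s = pvM t g s := by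
  unfold pvNE pvM
  by_cases hc : pvNumberStrings.contains g = true <;>
    simp only [hc, Bool.false_eq_true, if_true, if_false,
      PySem.List.foldl_append_singleton_eq_map, List.nil_append]

-- A's options loop ('if new_equivalent_set: append to new_equivalent_sets') is a filterMap
theorem pv_foldl_filterMap {α β : Type} (h : α → List β) (l : List α) (acc : List (List β)) :
    l.foldl (fun acc g => if h g ≠ [] then acc ++ [h g] else acc) acc
      = acc ++ l.filterMap (fun g => if h g = [] then none else some (h g)) := by
  induction l generalizing acc with
  | nil => simp
  | cons x xs ih =>
    simp only [List.foldl_cons]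
    split_ifs with hx <;> rw [ih] <;> simp [hx]

-- A's inner options loop equals B's filterMap over the same options list
theorem pv_inner_eq (t : String) (s : List String) (opts : List String) :
    opts.foldl (fun nes g => if pvNE t g s ≠ [] then nes ++ [pvNE t g s] else nes) []
      = opts.filterMap (fun o => if pvM t o s = [] then none else some (pvM t o s)) := by
  simp only [pvNE_eq]
  exact (pv_foldl_filterMap (fun g => pvM t g s) opts []).trans (by simp)

-- the five literal abstraction tokens all hit a real options branch, and it is B's branch
theorem pv_options_eq (t : String)
    (ht : t ∈ (["COLOR1", "COLOR2", "SHAPE1", "SHAPE2", "NUMBER1"] : List String)) :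
    (if PySem.Str.isIn "COLOR" t then pvCOLORS
     else if PySem.Str.isIn "SHAPE" t then pvSHAPES
     else if PySem.Str.isIn "NUMBER" t then pvNUMBERS
     else [])
    = (if PySem.Str.isIn "COLOR" t then pvCOLORS
       else if PySem.Str.isIn "SHAPE" t then pvSHAPES
       else pvNUMBERS) := by
  fin_cases ht <;> decide

-- B's recursion, one step, phrased through pvF
theorem pvExpand_cons (t : String) (ts : List String) (s : List String) :
    pvExpand (t :: ts) s = (pvF t s).flatMap (fun s' => pvExpand ts s') := by
  simp only [pvExpand, pvF]
  split <;> rename_i h <;> simp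

-- breadth-first staged fold = depth-first recursion
theorem pv_fold_eq_expand (ts : List String) (l : List (List String)) :
    ts.foldl (fun l t => l.flatMap (pvF t)) l = l.flatMap (fun s => pvExpand ts s) := by
  induction ts generalizing l with
  | nil => simp [pvExpand]
  | cons t ts ih =>
    simp only [List.foldl_cons, ih, List.flatMap_assoc, ← pvExpand_cons]

-- one full stage of A (its middle foldl over the current sets) equals flatMap of pvF
theorem pv_stage_eq (t : String)
    (ht : t ∈ (["COLOR1", "COLOR2", "SHAPE1", "SHAPE2", "NUMBER1"] : List String))
    (l : List (List String)) :
    l.foldl (fun ns s =>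
      if !(s.all (fun x => PySem.Str.isIn t x)) then ns ++ [s]
      else ns ++ ((if PySem.Str.isIn "COLOR" t then pvCOLORS
          else if PySem.Str.isIn "SHAPE" t then pvSHAPES
          else if PySem.Str.isIn "NUMBER" t then pvNUMBERS
          else []).foldl
        (fun nes g => if pvNE t g s ≠ [] then nes ++ [pvNE t g s] else nes) [])) []
    = l.flatMap (pvF t) := by
  have hbody : ∀ (ns : List (List String)) (s : List String),
      (if !(s.all (fun x => PySem.Str.isIn t x)) then ns ++ [s]
       else ns ++ ((if PySem.Str.isIn "COLOR" t then pvCOLORS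
          else if PySem.Str.isIn "SHAPE" t then pvSHAPES
          else if PySem.Str.isIn "NUMBER" t then pvNUMBERS
          else []).foldl
        (fun nes g => if pvNE t g s ≠ [] then nes ++ [pvNE t g s] else nes) []))
      = ns ++ pvF t s := by
    intro ns s
    by_cases hg : (s.all (fun x => PySem.Str.isIn t x)) = true
    · simp only [hg, Bool.not_true, Bool.false_eq_true, if_false, pvF]
      rw [pv_options_eq t ht, pv_inner_eq t s]
      rfl
    · rw [Bool.not_eq_true] at hg
      simp only [hg, Bool.not_false, if_true, pvF]
  exact (PySem.List.foldl_congr_mem' l _ (fun ns s => ns ++ pvF t s) []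
      (fun s _ ns => hbody ns s)).trans
    ((PySem.List.foldl_append_eq_flatMap (pvF t) l []).trans (by simp))

-- ===== VERDICT (by name: the statement is the Claim_ definition above) =====
theorem convert_abstract_phrase_to_grounded_spec : Claim_equal_convert_abstract_phrase_to_grounded := by
  intro phrases _
  unfold Spec_convert_abstract_phrase_to_grounded
  unfold convert_abstract_phrase_to_grounded convert_abstract_phrase_to_grounded_alt
  exact (PySem.List.foldl_congr_mem' _ _ (fun l t => l.flatMap (pvF t)) [phrases]
      (fun t ht l => pv_stage_eq t ht l)).trans
    ((pv_fold_eq_expand _ _).trans (by simp))
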